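-- pv_equiv track=rewrite | github.com/ss3414/algorithm | leetcode/leetcode0914.py | hasGroupsSizeX2
-- ===== SOURCE A (Python) =====
-- def hasGroupsSizeX2(deck: list) -> bool:
--     if len(deck) < 2:
--         return False
--
--     def gcd(a, b):
--         return b if a == 0 else gcd(b % a, a)
--
--     data = {}
--     for i in deck:
--         if i in data.keys():
--             data[i] = data[i] + 1
--         else:
--             data[i] = 1
--     vals = list(data.values())
--     x = vals[0]
--     for val in vals:
--         x = gcd(x, val)
--     return x > 1
-- ===== SOURCE B (Python) =====
-- def hasGroupsSizeX2(deck: list) -> bool: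
--     if len(deck) < 2:
--         return False
--     counts = {}
--     for card in deck:
--         counts[card] = counts.get(card, 0) + 1
--     vals = list(counts.values())
--     m = min(vals)
--     for d in range(2, m + 1):
--         if all(c % d == 0 for c in vals):
--             return True
--     return False
-- ===== Notes on version B (the rewrite author's own statement) =====
-- stated objective: alternative
-- what changed: B replaces A's recursive gcd folded over the counts by a direct search: it takes m = min(counts) and tests each candidate group size d in range(2, m+1) for dividing every count.
import Mathlib
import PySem

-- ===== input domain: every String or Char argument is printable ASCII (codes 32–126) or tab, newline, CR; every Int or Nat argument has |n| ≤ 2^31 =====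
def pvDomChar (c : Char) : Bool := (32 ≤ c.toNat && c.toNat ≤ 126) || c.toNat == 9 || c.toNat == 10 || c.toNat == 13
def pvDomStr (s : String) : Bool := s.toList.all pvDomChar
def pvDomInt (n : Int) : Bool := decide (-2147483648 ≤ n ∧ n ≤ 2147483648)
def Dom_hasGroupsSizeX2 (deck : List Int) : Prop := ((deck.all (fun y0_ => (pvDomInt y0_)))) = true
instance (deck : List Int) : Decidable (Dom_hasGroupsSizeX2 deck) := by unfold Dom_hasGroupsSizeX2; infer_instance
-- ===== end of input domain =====

-- B replaces A's recursive-gcd fold over the counts by a direct search for a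
-- common group size d in range(2, min(counts)+1); objective: alternative algorithm.

-- ===== PORT A =====
-- Python's inner gcd(a, b) = b if a == 0 else gcd(b % a, a), with Python's '%'.
def pygcd (a b : Int) : Int :=
  if a = 0 then b else pygcd (PySem.Int.mod b a) a
termination_by a.natAbs
decreasing_by
  rcases lt_or_gt_of_ne (show a ≠ 0 by assumption) with hneg | hpos
  · have h1 := PySem.Int.mod_neg_bounds b hneg
    omega
  · have h1 := PySem.Int.mod_nonneg b hpos
    have h2 := PySem.Int.mod_lt b hpos
    omega

def hasGroupsSizeX2 (deck : List Int) : Bool :=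
  if deck.length < 2 then false
  else
    let data := deck.foldl
      (fun d i => if d.contains i then d.insert i (d.getD i 0 + 1) else d.insert i 1)
      PySem.Dict.empty
    let vals := data.values
    -- vals[0]: exact via pyGetD because vals is nonempty whenever this line is reached
    let x := vals.foldl (fun x val => pygcd x val) (PySem.List.pyGetD vals 0 0)
    decide (x > 1)

-- ===== PORT B =====
def hasGroupsSizeX2_alt (deck : List Int) : Bool :=
  if deck.length < 2 then false
  else
    let counts := deck.foldl (fun d card => d.modify card 0 (· + 1)) PySem.Dict.empty
    let vals := counts.values
    -- min(vals): exact via getD because vals is nonempty whenever this line is reached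
    let m := (PySem.List.min? vals (fun v => v)).getD 0
    (PySem.List.pyRange 2 (m + 1) 1).any
      (fun d => vals.all (fun c => PySem.Int.mod c d == 0))

-- ===== PRECONDITION & SPEC =====
def Spec_hasGroupsSizeX2 (deck : List Int) (out : Bool) : Prop := out = hasGroupsSizeX2_alt deck
instance (deck : List Int) (out : Bool) : Decidable (Spec_hasGroupsSizeX2 deck out) := by unfold Spec_hasGroupsSizeX2; infer_instance

-- ===== CLAIM (what is proved, stated in full; the proofs are below) =====
def Claim_equal_hasGroupsSizeX2 : Prop := ∀ (deck : List Int), Dom_hasGroupsSizeX2 deck → Spec_hasGroupsSizeX2 deck (hasGroupsSizeX2 deck)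

-- ===== LEMMAS AND PROOFS =====

-- pygcd is Int.gcd on nonnegative arguments
theorem pygcd_eq (a b : Int) (ha : 0 ≤ a) (hb : 0 ≤ b) : pygcd a b = (Int.gcd a b : Int) := by
  rw [pygcd]
  split_ifs with h
  · subst h
    simp [Int.natAbs_of_nonneg hb]
  · have hapos : 0 < a := lt_of_le_of_ne ha (Ne.symm h)
    rw [PySem.Int.mod_eq_emod_of_pos hapos]
    have hmn : 0 ≤ b % a := Int.emod_nonneg b (by omega)
    rw [pygcd_eq (b % a) a hmn ha]
    congr 1
    obtain ⟨m, rfl⟩ := Int.eq_ofNat_of_zero_le ha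
    obtain ⟨n, rfl⟩ := Int.eq_ofNat_of_zero_le hb
    have hc : ((n : Int) % (m : Int)) = ((n % m : Nat) : Int) := (Int.natCast_mod n m).symm
    rw [hc, Int.gcd_natCast_natCast, Int.gcd_natCast_natCast]
    exact (Nat.gcd_rec m n).symm
termination_by a.natAbs
decreasing_by
  have hapos : 0 < a := lt_of_le_of_ne ha (Ne.symm h)
  have h2 : b % a < a := Int.emod_lt_of_pos b hapos
  omega

-- an Int divides ↑(Int.gcd a b) iff it divides both
theorem int_dvd_gcd_iff (d a b : Int) :
    d ∣ (Int.gcd a b : Int) ↔ d ∣ a ∧ d ∣ b := by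
  constructor
  · intro hd
    exact ⟨hd.trans (Int.gcd_dvd_left a b), hd.trans (Int.gcd_dvd_right a b)⟩
  · rintro ⟨h1, h2⟩
    rw [← Int.natAbs_dvd] at h1 h2 ⊢
    exact_mod_cast Int.natCast_dvd_natCast.mpr (Int.dvd_gcd h1 h2)

-- the gcd fold: nonnegative, and its divisors are the common divisors
theorem foldl_pygcd_spec (l : List Int) (init : Int) (h0 : 0 ≤ init) (hl : ∀ v ∈ l, 0 ≤ v) :
    0 ≤ l.foldl pygcd init ∧
      ∀ d : Int, d ∣ l.foldl pygcd init ↔ (d ∣ init ∧ ∀ v ∈ l, d ∣ v) := by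
  induction l generalizing init with
  | nil => simpa using h0
  | cons v t ih =>
    have hv : 0 ≤ v := hl v (by simp)
    have ht : ∀ w ∈ t, 0 ≤ w := fun w hw => hl w (by simp [hw])
    have hstep : pygcd init v = (Int.gcd init v : Int) := pygcd_eq init v h0 hv
    have := ih (pygcd init v) (by rw [hstep]; exact Int.natCast_nonneg _) ht
    refine ⟨by simpa using this.1, fun d => ?_⟩
    rw [List.foldl_cons, this.2 d, hstep, int_dvd_gcd_iff]
    constructor
    · rintro ⟨⟨hi0, hvd⟩, hts⟩
      exact ⟨hi0, fun w hw => by rcases List.mem_cons.mp hw with rfl | hw; exacts [hvd, hts w hw]⟩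
    · rintro ⟨hi, hall⟩
      exact ⟨⟨hi, hall v (by simp)⟩, fun w hw => hall w (by simp [hw])⟩

-- the core equivalence, over any nonempty list of positive counts
theorem core (vals : List Int) (hne : vals ≠ []) (h1 : ∀ v ∈ vals, 1 ≤ v) :
    decide (vals.foldl (fun x val => pygcd x val) (PySem.List.pyGetD vals 0 0) > 1) =
      (PySem.List.pyRange 2 (((PySem.List.min? vals (fun v => v)).getD 0) + 1) 1).any
        (fun d => vals.all (fun c => PySem.Int.mod c d == 0)) := by
  obtain ⟨v0, t, rfl⟩ := List.exists_cons_of_ne_nil hne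
  obtain ⟨m, hm⟩ : ∃ m, PySem.List.min? (v0 :: t) (fun v => v) = some m := by
    rcases h : PySem.List.min? (v0 :: t) (fun v => v) with _ | m
    · exact absurd ((PySem.List.min?_eq_none_iff _ _).mp h) (by simp)
    · exact ⟨m, rfl⟩
  have hmmem : m ∈ v0 :: t := PySem.List.min?_mem hm
  have hmmin : ∀ y ∈ v0 :: t, m ≤ y := PySem.List.min?_isMin hm
  have hm1 : 1 ≤ m := h1 m hmmem
  have hget : PySem.List.pyGetD (v0 :: t) 0 0 = v0 := by simp [PySem.List.pyGetD]
  rw [hget, hm]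
  simp only [Option.getD_some]
  set vals := v0 :: t with hvals
  set g := vals.foldl (fun x val => pygcd x val) v0 with hg
  have hfold := foldl_pygcd_spec vals v0 (by have := h1 v0 (by simp [hvals]); omega)
    (fun v hv => le_trans zero_le_one (h1 v hv))
  have hgdef : g = vals.foldl pygcd v0 := by
    simp only [hg]
  have hdvd : ∀ d : Int, d ∣ g ↔ ∀ v ∈ vals, d ∣ v := by
    intro d
    rw [hgdef, (hfold.2 d)]
    constructor
    · rintro ⟨_, h⟩; exact h
    · intro h; exact ⟨h v0 (by simp [hvals]), h⟩
  have hgall : ∀ v ∈ vals, g ∣ v := (hdvd g).mp dvd_rfl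
  -- turn both Bools into propositions
  rw [Bool.eq_iff_iff]
  simp only [decide_eq_true_eq, List.any_eq_true, List.all_eq_true, beq_iff_eq,
    PySem.Int.mod_eq_zero_iff_dvd, PySem.List.mem_pyRange_one]
  constructor
  · intro hgt
    refine ⟨g, ⟨by omega, ?_⟩, fun c hc => hgall c hc⟩
    have : g ∣ m := hgall m hmmem
    have : g ≤ m := Int.le_of_dvd (by omega) this
    omega
  · rintro ⟨d, ⟨hd2, _⟩, hdall⟩
    have hdg : d ∣ g := (hdvd d).mpr hdall
    have hgpos' : 0 < g := by
      have h0g := hfold.1; rw [← hgdef] at h0g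
      have hgm : g ∣ v0 := hgall v0 (by simp [hvals])
      have hv01 : 1 ≤ v0 := h1 v0 (by simp [hvals])
      rcases eq_or_lt_of_le h0g with h | h
      · exfalso
        have : v0 = 0 := zero_dvd_iff.mp (h ▸ hgm)
        omega
      · exact h
    have := Int.le_of_dvd hgpos' hdg
    omega

-- A's counting loop builds the same dict as B's
theorem dict_eq (deck : List Int) :
    deck.foldl
      (fun d i => if d.contains i then d.insert i (d.getD i 0 + 1) else d.insert i 1)
      (PySem.Dict.empty : PySem.Dict Int Int) =
    deck.foldl (fun d card => d.modify card 0 (· + 1)) PySem.Dict.empty := by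
  have hfun : (fun (d : PySem.Dict Int Int) i =>
      if d.contains i then d.insert i (d.getD i 0 + 1) else d.insert i 1) =
      fun d card => d.modify card 0 (· + 1) := by
    funext d i
    by_cases h : d.contains i
    · simp [PySem.Dict.modify, h]
    · have : d.get? i = none := (PySem.Dict.get?_eq_none_iff_contains d i).mpr (by simpa using h)
      simp [PySem.Dict.modify, PySem.Dict.getD, this]
  rw [hfun]

-- values of the counter: each is a positive count, and nonempty for a nonempty deck
theorem counter_values (deck : List Int) (hne : deck ≠ []) :
    (deck.foldl (fun d card => d.modify card 0 (· + 1))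
      (PySem.Dict.empty : PySem.Dict Int Int)).values ≠ [] ∧
    ∀ v ∈ (deck.foldl (fun d card => d.modify card 0 (· + 1))
      (PySem.Dict.empty : PySem.Dict Int Int)).values, 1 ≤ v := by
  set cnt := deck.foldl (fun d card => d.modify card 0 (· + 1))
    (PySem.Dict.empty : PySem.Dict Int Int) with hcnt
  have hkeys : cnt.keys = PySem.Set.update ([] : PySem.Set Int) deck := by
    simpa using PySem.Dict.keys_foldl_modify deck 0 (fun _ _ v => v + 1) PySem.Dict.empty
  have hkset : cnt.keys = PySem.Set.ofList deck := hkeys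
  have hnd : cnt.keys.Nodup := by
    rw [hkset]; exact PySem.Set.nodup_ofList deck
  have hvals : cnt.values = cnt.keys.map (fun k => cnt.getD k 0) :=
    PySem.Dict.values_eq_map_keys cnt hnd 0
  have hgetD : ∀ k, cnt.getD k 0 = (deck.count k : Int) := by
    intro k
    have := PySem.Dict.getD_foldl_modify_add_one deck (PySem.Dict.empty : PySem.Dict Int Int) k
    simpa [hcnt] using this
  constructor
  · rw [hvals]
    obtain ⟨x, t, rfl⟩ := List.exists_cons_of_ne_nil hne
    have : x ∈ cnt.keys := by
      rw [hkset]; exact (PySem.Set.mem_ofList _ _).mpr (by simp)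
    intro hcon
    rw [List.map_eq_nil_iff] at hcon
    simp [hcon] at this
  · intro v hv
    rw [hvals] at hv
    obtain ⟨k, hk, rfl⟩ := List.mem_map.mp hv
    have hkd : k ∈ deck := by
      rw [hkset] at hk; exact (PySem.Set.mem_ofList _ _).mp hk
    rw [hgetD k]
    have : 1 ≤ deck.count k := List.count_pos_iff.mpr hkd
    omega

-- ===== VERDICT (by name: the statement is the Claim_ definition above) =====
theorem hasGroupsSizeX2_spec : Claim_equal_hasGroupsSizeX2 := by
  intro deck _
  unfold Spec_hasGroupsSizeX2 hasGroupsSizeX2 hasGroupsSizeX2_alt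
  by_cases hlen : deck.length < 2
  · simp [hlen]
  · simp only [hlen, if_false]
    rw [dict_eq]
    have hne : deck ≠ [] := by
      intro h; subst h; simp at hlen
    obtain ⟨hvne, hvpos⟩ := counter_values deck hne
    exact core _ hvne hvpos
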